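-- pv_equiv track=rewrite | github.com/Salome2010/IntroProgramacion | recu.py | racha_mas_larga
-- ===== SOURCE A (Python) =====
-- def racha_mas_larga(tiempos:[int]) -> (int,int):
--     longitud:int = 0
--     longitudMax:int = 0
--     indice:int = 0
--     indiceMax:int = 0
--     indiceIn:int = 0
--     for i in range(len(tiempos)):
--         if 0<tiempos[i]<61:
--             if longitud == 0:
--                 indice=i
--             longitud+=1
--             if longitud>longitudMax:
--                 longitudMax = longitud
--                 indiceIn = indice
--                 indiceMax = i
--         else:
--             longitud = 0
--     return (indiceIn,indiceMax)
-- ===== SOURCE B (Python) =====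
-- def racha_mas_larga(tiempos):
--     # Collect every maximal run of in-range values as (start, end), then pick
--     # the first longest one with max(key=...); (0, 0) if there is none.
--     runs = []
--     start = None
--     for i, x in enumerate(tiempos):
--         if 0 < x < 61:
--             if start is None:
--                 start = i
--         else:
--             if start is not None:
--                 runs.append((start, i - 1))
--                 start = None
--     if start is not None:
--         runs.append((start, len(tiempos) - 1))
--     if not runs:
--         return (0, 0)
--     return max(runs, key=lambda r: r[1] - r[0] + 1)
-- ===== Notes on version B (the rewrite author's own statement) =====
-- stated objective: alternative
-- what changed: Replaces A's inline running-max bookkeeping (five mutable counters updated per element) with a build-then-select decomposition: one pass collects every maximal in-range run as a (start, end) pair, then max(key=length) picks the first longest run.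
import Mathlib
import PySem

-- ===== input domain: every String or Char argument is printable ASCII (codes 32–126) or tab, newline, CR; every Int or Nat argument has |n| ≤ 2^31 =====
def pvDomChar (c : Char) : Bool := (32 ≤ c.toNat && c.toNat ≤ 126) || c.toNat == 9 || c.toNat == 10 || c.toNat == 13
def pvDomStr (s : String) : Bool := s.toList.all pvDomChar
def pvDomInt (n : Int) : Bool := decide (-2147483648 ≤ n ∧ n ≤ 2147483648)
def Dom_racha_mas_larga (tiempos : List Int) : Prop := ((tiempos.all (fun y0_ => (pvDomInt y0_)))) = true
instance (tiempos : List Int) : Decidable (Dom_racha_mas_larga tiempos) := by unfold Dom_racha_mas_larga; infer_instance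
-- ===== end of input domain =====

-- B replaces A's inline running-max bookkeeping by first collecting the maximal
-- in-range runs as (start, end) pairs and then selecting the first longest one
-- (alternative decomposition, same O(n) cost).

-- ===== PORT A =====
-- state = (longitud, longitudMax, indice, indiceMax, indiceIn)
def pvStepA (st : Int × Int × Int × Int × Int) (p : Int × Int) : Int × Int × Int × Int × Int :=
  let (longitud, longitudMax, indice, indiceMax, indiceIn) := st
  let (i, x) := p
  if 0 < x ∧ x < 61 then
    let indice := if longitud = 0 then i else indice
    let longitud := longitud + 1
    if longitud > longitudMax then
      (longitud, longitud, indice, i, indice)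
    else
      (longitud, longitudMax, indice, indiceMax, indiceIn)
  else
    (0, longitudMax, indice, indiceMax, indiceIn)

def racha_mas_larga (tiempos : List Int) : Int × Int :=
  let st := (PySem.List.enumerate tiempos 0).foldl pvStepA (0, 0, 0, 0, 0)
  (st.2.2.2.2, st.2.2.2.1)

-- ===== PORT B =====
def pvLen (r : Int × Int) : Int := r.2 - r.1 + 1

-- state = (runs collected so far, start of the current run if inside one)
def pvStepB (st : List (Int × Int) × Option Int) (p : Int × Int) : List (Int × Int) × Option Int :=
  let (runs, start) := st
  let (i, x) := p
  if 0 < x ∧ x < 61 then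
    (runs, some (start.getD i))
  else
    match start with
    | some s => (runs ++ [(s, i - 1)], none)
    | none => (runs, none)

-- max(runs, key=len) keeps the first maximum (Python's strict '>' rule)
def pvSel (b : Int × Int) (rs : List (Int × Int)) : Int × Int :=
  rs.foldl (fun b r => if pvLen r > pvLen b then r else b) b

def racha_mas_larga_alt (tiempos : List Int) : Int × Int :=
  let st := (PySem.List.enumerate tiempos 0).foldl pvStepB ([], none)
  let runs := match st.2 with
    | some s => st.1 ++ [(s, (tiempos.length : Int) - 1)]
    | none => st.1
  match runs with
  | [] => (0, 0)
  | r :: rs => pvSel r rs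

-- ===== PRECONDITION & SPEC =====
def Spec_racha_mas_larga (tiempos : List Int) (out : Int × Int) : Prop := out = racha_mas_larga_alt tiempos
instance (tiempos : List Int) (out : Int × Int) : Decidable (Spec_racha_mas_larga tiempos out) := by unfold Spec_racha_mas_larga; infer_instance

-- ===== CLAIM (what is proved, stated in full; the proofs are below) =====
def Claim_equal_racha_mas_larga : Prop := ∀ (tiempos : List Int), Dom_racha_mas_larga tiempos → Spec_racha_mas_larga tiempos (racha_mas_larga tiempos)

-- ===== LEMMAS AND PROOFS =====

-- A's best triple (longitudMax, indiceIn, indiceMax) as a function of a run list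
def pvSelF : List (Int × Int) → Int × Int × Int
  | [] => (0, 0, 0)
  | r :: rs => let b := pvSel r rs; (pvLen b, b.1, b.2)

def pvFlush (start : Option Int) (e : Int) : List (Int × Int) :=
  match start with
  | some s => [(s, e)]
  | none => []

-- B's final selection from a fold state
def pvFinishB (runs : List (Int × Int)) (start : Option Int) (n : Int) : Int × Int :=
  match runs ++ pvFlush start (n - 1) with
  | [] => (0, 0)
  | r :: rs => pvSel r rs

lemma pvSel_append (b : Int × Int) (rs : List (Int × Int)) (r : Int × Int) :
    pvSel b (rs ++ [r]) = (if pvLen r > pvLen (pvSel b rs) then r else pvSel b rs) := by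
  simp [pvSel, List.foldl_append]

lemma pvSelF_append (rs : List (Int × Int)) (r : Int × Int) (h : 0 < pvLen r) :
    pvSelF (rs ++ [r]) = (if (pvSelF rs).1 < pvLen r then (pvLen r, r.1, r.2) else pvSelF rs) := by
  cases rs with
  | nil => simp [pvSelF, pvSel, h]
  | cons r0 rs0 =>
    simp only [List.cons_append, pvSelF, pvSel_append]
    by_cases hc : pvLen (pvSel r0 rs0) < pvLen r <;> simp [hc]

-- the invariant between A's fold state and B's fold state, carried through the loop
lemma pv_main (xs : List Int) : ∀ (i L M ind iM iIn : Int) (runs : List (Int × Int)) (start : Option Int),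
    (match start with
     | none => L = 0
     | some s => L = i - s ∧ ind = s ∧ 1 ≤ L) →
    (M, iIn, iM) = pvSelF (runs ++ pvFlush start (i - 1)) →
    (((PySem.List.enumerate xs i).foldl pvStepA (L, M, ind, iM, iIn)).2.2.2.2,
      ((PySem.List.enumerate xs i).foldl pvStepA (L, M, ind, iM, iIn)).2.2.2.1) =
      pvFinishB ((PySem.List.enumerate xs i).foldl pvStepB (runs, start)).1
        ((PySem.List.enumerate xs i).foldl pvStepB (runs, start)).2 (i + xs.length) := by
  induction xs with
  | nil =>
    intro i L M ind iM iIn runs start hL hB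
    simp only [PySem.List.enumerate_nil, List.foldl_nil, List.length_nil]
    simp only [pvFinishB]
    rcases hrs : runs ++ pvFlush start (i + (0:Nat) - 1) with _ | ⟨r, rs⟩
    · have : (M, iIn, iM) = pvSelF [] := by
        rw [hB]; congr 1; simpa using hrs
      simp [pvSelF] at this
      simp [this.2.1, this.2.2]
    · have : (M, iIn, iM) = pvSelF (r :: rs) := by
        rw [hB]; congr 1; simpa using hrs
      simp only [pvSelF] at this
      have h1 : iIn = (pvSel r rs).1 := by
        have := congrArg (fun t => t.2.1) this; simpa using this
      have h2 : iM = (pvSel r rs).2 := by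
        have := congrArg (fun t => t.2.2) this; simpa using this
      simp [h1, h2]
  | cons x xs ih =>
    intro i L M ind iM iIn runs start hL hB
    rw [PySem.List.enumerate_cons]
    simp only [List.foldl_cons]
    have hn : (i + ((x :: xs).length : Int)) = (i + 1) + (xs.length : Int) := by
      push_cast [List.length_cons]; ring
    rw [hn]
    by_cases hx : 0 < x ∧ x < 61
    · -- in-range element
      cases start with
      | none =>
        have hL0 : L = 0 := hL
        have hstepA : pvStepA (L, M, ind, iM, iIn) (i, x) =
            (if 1 > M then ((1 : Int), 1, i, i, i) else (1, M, i, iM, iIn)) := by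
          simp [pvStepA, hx, hL0]
        have hstepB : pvStepB (runs, none) (i, x) = (runs, some i) := by
          simp [pvStepB, hx]
        rw [hstepA, hstepB]
        have hflush : runs ++ pvFlush (some i) (i + 1 - 1) = (runs ++ pvFlush none (i-1)) ++ [(i, i)] := by
          simp [pvFlush]
        have hsel : pvSelF (runs ++ pvFlush (some i) (i + 1 - 1)) =
            (if (pvSelF (runs ++ pvFlush none (i-1))).1 < pvLen (i, i) then (pvLen (i,i), i, i)
             else pvSelF (runs ++ pvFlush none (i-1))) := by
          rw [hflush]; exact pvSelF_append _ _ (by simp [pvLen])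
        have hM : (pvSelF (runs ++ pvFlush none (i-1))).1 = M := by rw [← hB]
        have hlen : pvLen (i, i) = 1 := by simp [pvLen]
        split_ifs with hc
        · -- 1 > M
          refine ih (i+1) 1 1 i i i runs (some i) (by constructor <;> omega) ?_
          rw [hsel, hM, hlen]
          simp [show M < 1 from hc]
        · refine ih (i+1) 1 M i iM iIn runs (some i) (by constructor <;> omega) ?_
          rw [hsel, hM, hlen]
          simp only [show ¬ (M < 1) by omega, if_false]
          simpa using hB
      | some s =>
        obtain ⟨hLs, hind, hL1⟩ := hL
        have hstepA : pvStepA (L, M, ind, iM, iIn) (i, x) =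
            (if L + 1 > M then (L + 1, L + 1, ind, i, ind) else (L + 1, M, ind, iM, iIn)) := by
          have : ¬ (L = 0) := by omega
          simp [pvStepA, hx, this]
        have hstepB : pvStepB (runs, some s) (i, x) = (runs, some s) := by
          simp [pvStepB, hx]
        rw [hstepA, hstepB]
        have hold : runs ++ pvFlush (some s) (i - 1) = runs ++ [(s, i - 1)] := by simp [pvFlush]
        have hnew : runs ++ pvFlush (some s) (i + 1 - 1) = runs ++ [(s, i)] := by
          simp [pvFlush]
        have hlo : pvLen (s, i - 1) = L := by simp [pvLen]; omega
        have hln : pvLen (s, i) = L + 1 := by simp [pvLen]; omega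
        have hso : pvSelF (runs ++ [(s, i - 1)]) =
            (if (pvSelF runs).1 < L then (L, s, i - 1) else pvSelF runs) := by
          rw [pvSelF_append runs _ (by rw [hlo]; omega), hlo]
        have hsn : pvSelF (runs ++ [(s, i)]) =
            (if (pvSelF runs).1 < L + 1 then (L + 1, s, i) else pvSelF runs) := by
          rw [pvSelF_append runs _ (by rw [hln]; omega), hln]
        rw [hold] at hB
        set m0 := (pvSelF runs).1 with hm0
        split_ifs with hc
        · -- L + 1 > M
          refine ih (i+1) (L+1) (L+1) ind i ind runs (some s) (by refine ⟨by omega, hind, by omega⟩) ?_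
          rw [hnew, hsn]
          have hm0lt : m0 < L + 1 := by
            rcases lt_or_ge m0 L with h | h
            · omega
            · have h1 : (M, iIn, iM) = pvSelF runs := by
                rw [hB, hso, if_neg (show ¬ (m0 < L) by omega)]
              have h2 : M = m0 := by rw [hm0]; exact congrArg Prod.fst h1
              omega
          simp [hm0lt, hind]
        · -- L + 1 ≤ M
          refine ih (i+1) (L+1) M ind iM iIn runs (some s) (by refine ⟨by omega, hind, by omega⟩) ?_
          rw [hnew, hsn]
          have hMge : m0 ≥ L + 1 := by
            rcases lt_or_ge m0 L with h | h
            · have h1 : (M, iIn, iM) = (L, s, i - 1) := by rw [hB, hso, if_pos h]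
              have h2 : M = L := congrArg Prod.fst h1
              omega
            · have h1 : (M, iIn, iM) = pvSelF runs := by
                rw [hB, hso, if_neg (show ¬ (m0 < L) by omega)]
              have h2 : M = m0 := by rw [hm0]; exact congrArg Prod.fst h1
              omega
          rw [if_neg (show ¬ (m0 < L + 1) by omega), hB, hso,
            if_neg (show ¬ (m0 < L) by omega)]
    · -- out-of-range element
      have hstepA : pvStepA (L, M, ind, iM, iIn) (i, x) = (0, M, ind, iM, iIn) := by
        simp [pvStepA, hx]
      rw [hstepA]
      cases start with
      | none =>
        have hstepB : pvStepB (runs, none) (i, x) = (runs, none) := by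
          simp [pvStepB, hx]
        rw [hstepB]
        refine ih (i+1) 0 M ind iM iIn runs none rfl ?_
        simpa [pvFlush] using hB
      | some s =>
        have hstepB : pvStepB (runs, some s) (i, x) = (runs ++ [(s, i - 1)], none) := by
          simp [pvStepB, hx]
        rw [hstepB]
        refine ih (i+1) 0 M ind iM iIn (runs ++ [(s, i - 1)]) none rfl ?_
        simpa [pvFlush] using hB

-- ===== VERDICT (by name: the statement is the Claim_ definition above) =====
theorem racha_mas_larga_spec : Claim_equal_racha_mas_larga := by
  intro tiempos _
  unfold Spec_racha_mas_larga racha_mas_larga racha_mas_larga_alt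
  have h := pv_main tiempos 0 0 0 0 0 0 [] none rfl (by simp [pvFlush, pvSelF])
  simp only at h ⊢
  rw [h]
  rcases hst : (PySem.List.enumerate tiempos 0).foldl pvStepB ([], none) with ⟨runs, start⟩
  cases start <;> simp [pvFinishB, pvFlush]
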